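-- pv_equiv track=rewrite | github.com/yojr23/AQVision | calidad_aire/esqueleto.py | mayores_mediciones_ICA_y_departamento
-- ===== SOURCE A (Python) =====
-- def mayores_mediciones_ICA_y_departamento(matrix, ICAs_dict, dept_dict):
--     mayorJotas=0
--     mayorIes=0
--     mayor=0
--     for i in range(len(matrix)):
--         for j in matrix[i]:
--             if j > mayor:
--                 mayor=j
--                 mayorJotas = matrix[i].index(j)
--                 mayorIes = i
--     return (list(dept_dict.values())[mayorIes]),(list(ICAs_dict.values())[mayorJotas])
-- ===== SOURCE B (Python) =====
-- def mayores_mediciones_ICA_y_departamento(matrix, ICAs_dict, dept_dict):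
--     # pass 1: global maximum (strict comparison starting from 0, as the task intends)
--     best_val = 0
--     for row in matrix:
--         for v in row:
--             if v > best_val:
--                 best_val = v
--     # pass 2: locate it (first row containing it, first column inside that row)
--     best_i = 0
--     best_j = 0
--     if best_val > 0:
--         for i, row in enumerate(matrix):
--             if best_val in row:
--                 best_i = i
--                 best_j = row.index(best_val)
--                 break
--     return list(dept_dict.values())[best_i], list(ICAs_dict.values())[best_j]
-- ===== Notes on version B (the rewrite author's own statement) =====
-- stated objective: alternative
-- what changed: A tracks the running maximum and its row/column indices in one triple-state nested scan; B first computes the global maximum in a pure max pass, then (only if it is positive) locates the first row containing it and the first column inside that row in a second pass with a break.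
import Mathlib
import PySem

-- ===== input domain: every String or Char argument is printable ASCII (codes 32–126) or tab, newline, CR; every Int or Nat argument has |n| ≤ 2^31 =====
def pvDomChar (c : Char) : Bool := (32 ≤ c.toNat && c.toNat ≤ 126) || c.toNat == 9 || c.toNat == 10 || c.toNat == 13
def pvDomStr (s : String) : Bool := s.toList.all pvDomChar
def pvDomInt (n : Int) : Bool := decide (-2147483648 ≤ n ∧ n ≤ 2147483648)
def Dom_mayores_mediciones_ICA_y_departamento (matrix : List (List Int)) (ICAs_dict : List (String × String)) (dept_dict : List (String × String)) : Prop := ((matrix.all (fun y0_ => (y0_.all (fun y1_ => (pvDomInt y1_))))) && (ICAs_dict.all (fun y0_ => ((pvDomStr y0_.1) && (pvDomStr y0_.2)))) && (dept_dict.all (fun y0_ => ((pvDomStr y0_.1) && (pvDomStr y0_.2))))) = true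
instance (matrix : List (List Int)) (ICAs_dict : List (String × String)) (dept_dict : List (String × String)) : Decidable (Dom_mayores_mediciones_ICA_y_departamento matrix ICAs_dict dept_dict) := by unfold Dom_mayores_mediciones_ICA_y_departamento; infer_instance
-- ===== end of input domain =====

-- B replaces A's single max-tracking scan by a find-the-max pass followed by a locate pass (alternative decomposition, same cost).


-- ===== PORT A =====
-- state = (mayorJotas, mayorIes, mayor); row loop is the foldl, outer range(len(matrix)) loop is the recursion carrying i
def pvA_rows : List (List Int) → Int → Int × Int × Int → Int × Int × Int
  | [], _, st => st
  | r :: rest, i, st =>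
      pvA_rows rest (i + 1)
        (r.foldl (fun st j =>
          if j > st.2.2 then ((((PySem.List.index? r j).getD 0 : Nat) : Int), i, j) else st) st)

def mayores_mediciones_ICA_y_departamento (matrix : List (List Int)) (ICAs_dict : List (String × String)) (dept_dict : List (String × String)) : String × String :=
  let st := pvA_rows matrix 0 (0, 0, 0)
  (((PySem.List.pyGet? (PySem.Dict.ofList dept_dict).values st.2.1).getD ""),
   ((PySem.List.pyGet? (PySem.Dict.ofList ICAs_dict).values st.1).getD ""))

-- ===== PORT B =====
-- pass 1: global maximum with strict comparison starting from 0
def pvB_max (matrix : List (List Int)) : Int :=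
  matrix.foldl (fun m row => row.foldl (fun m v => if v > m then v else m) m) 0

-- pass 2: first row containing bv, first column inside that row (the break in Source B)
def pvB_find : Int → Int → List (List Int) → Int × Int
  | _, _, [] => (0, 0)
  | bv, i, row :: rest =>
      if bv ∈ row then (i, (((PySem.List.index? row bv).getD 0 : Nat) : Int))
      else pvB_find bv (i + 1) rest

def mayores_mediciones_ICA_y_departamento_alt (matrix : List (List Int)) (ICAs_dict : List (String × String)) (dept_dict : List (String × String)) : String × String :=
  let bv := pvB_max matrix
  let p := if bv > 0 then pvB_find bv 0 matrix else (0, 0)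
  (((PySem.List.pyGet? (PySem.Dict.ofList dept_dict).values p.1).getD ""),
   ((PySem.List.pyGet? (PySem.Dict.ofList ICAs_dict).values p.2).getD ""))

-- ===== PRECONDITION & SPEC =====
-- Pre_ excludes exactly the inputs on which A raises IndexError: the row index of the (first occurrence of the)
-- positive global maximum must be within the dept-values list and its column index within the ICA-values list;
-- when no entry is positive both indices are 0, so both dicts must be non-empty.
def Pre_mayores_mediciones_ICA_y_departamento (matrix : List (List Int)) (ICAs_dict : List (String × String)) (dept_dict : List (String × String)) : Prop :=
  (matrix.flatten.foldr max 0 > 0 →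
     matrix.findIdx (fun r => decide (matrix.flatten.foldr max 0 ∈ r)) < (PySem.Dict.ofList dept_dict).values.length ∧
     (matrix.getD (matrix.findIdx (fun r => decide (matrix.flatten.foldr max 0 ∈ r))) []).idxOf (matrix.flatten.foldr max 0) < (PySem.Dict.ofList ICAs_dict).values.length) ∧
  (¬ matrix.flatten.foldr max 0 > 0 →
     (PySem.Dict.ofList dept_dict).values ≠ [] ∧ (PySem.Dict.ofList ICAs_dict).values ≠ [])
instance (matrix : List (List Int)) (ICAs_dict : List (String × String)) (dept_dict : List (String × String)) : Decidable (Pre_mayores_mediciones_ICA_y_departamento matrix ICAs_dict dept_dict) := by unfold Pre_mayores_mediciones_ICA_y_departamento; infer_instance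

def pvWitness_mayores_mediciones_ICA_y_departamento : List (List Int) × (List (String × String)) × (List (String × String)) :=
  ([[1, 3], [2]], [("a", "x"), ("b", "y")], [("c", "u"), ("d", "v")])

def Spec_mayores_mediciones_ICA_y_departamento (matrix : List (List Int)) (ICAs_dict : List (String × String)) (dept_dict : List (String × String)) (out : String × String) : Prop := out = mayores_mediciones_ICA_y_departamento_alt matrix ICAs_dict dept_dict
instance (matrix : List (List Int)) (ICAs_dict : List (String × String)) (dept_dict : List (String × String)) (out : String × String) : Decidable (Spec_mayores_mediciones_ICA_y_departamento matrix ICAs_dict dept_dict out) := by unfold Spec_mayores_mediciones_ICA_y_departamento; infer_instance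

-- ===== CLAIM (what is proved, stated in full; the proofs are below) =====
def Claim_equal_mayores_mediciones_ICA_y_departamento : Prop := ∀ (matrix : List (List Int)) (ICAs_dict : List (String × String)) (dept_dict : List (String × String)), Dom_mayores_mediciones_ICA_y_departamento matrix ICAs_dict dept_dict → Pre_mayores_mediciones_ICA_y_departamento matrix ICAs_dict dept_dict → Spec_mayores_mediciones_ICA_y_departamento matrix ICAs_dict dept_dict (mayores_mediciones_ICA_y_departamento matrix ICAs_dict dept_dict)

-- ===== LEMMAS AND PROOFS =====

theorem pv_le_rowfold (r : List Int) (m : Int) :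
    m ≤ r.foldl (fun m v => if v > m then v else m) m := by
  induction r generalizing m with
  | nil => simp
  | cons a t ih =>
      simp only [List.foldl]
      refine le_trans ?_ (ih (if a > m then a else m))
      split <;> omega

theorem pv_mem_le_rowfold (r : List Int) (m a : Int) (h : a ∈ r) :
    a ≤ r.foldl (fun m v => if v > m then v else m) m := by
  induction r generalizing m with
  | nil => simp at h
  | cons b t ih =>
      simp only [List.foldl]
      rcases List.mem_cons.mp h with h | h
      · subst h
        refine le_trans ?_ (pv_le_rowfold t (if a > m then a else m))
        split <;> omega
      · exact ih _ h

theorem pv_rowfold_mem_or (r : List Int) (m : Int) :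
    r.foldl (fun m v => if v > m then v else m) m = m ∨
    r.foldl (fun m v => if v > m then v else m) m ∈ r := by
  induction r generalizing m with
  | nil => simp
  | cons a t ih =>
      simp only [List.foldl]
      rcases ih (if a > m then a else m) with h | h
      · by_cases ha : a > m
        · right; rw [h, if_pos ha]; exact List.mem_cons_self
        · left; rw [h, if_neg ha]
      · right; exact List.mem_cons_of_mem _ h

theorem pv_inner (r t : List Int) (i jj ii m : Int) :
    t.foldl (fun st j =>
      if j > st.2.2 then ((((PySem.List.index? r j).getD 0 : Nat) : Int), i, j) else st) (jj, ii, m)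
    = (if (t.foldl (fun m v => if v > m then v else m) m) > m
        then ((((PySem.List.index? r (t.foldl (fun m v => if v > m then v else m) m)).getD 0 : Nat) : Int), i,
              t.foldl (fun m v => if v > m then v else m) m)
        else (jj, ii, m)) := by
  induction t generalizing jj ii m with
  | nil => simp
  | cons a t ih =>
      simp only [List.foldl]
      by_cases h : a > m
      · rw [if_pos h]
        have hm : (if a > m then a else m) = a := if_pos h
        rw [hm, ih]
        have hge := pv_le_rowfold t a
        by_cases h2 : t.foldl (fun m v => if v > m then v else m) a > a
        · rw [if_pos h2, if_pos (by omega)]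
        · have : t.foldl (fun m v => if v > m then v else m) a = a := by omega
          rw [if_neg h2, this, if_pos h]
      · rw [if_neg h]
        have hm : (if a > m then a else m) = m := if_neg h
        rw [hm, ih]

theorem pv_rowsfold_le (rows : List (List Int)) (m : Int) :
    m ≤ rows.foldl (fun m row => row.foldl (fun m v => if v > m then v else m) m) m := by
  induction rows generalizing m with
  | nil => simp
  | cons r rest ih =>
      simp only [List.foldl]
      exact le_trans (pv_le_rowfold r m) (ih _)

theorem pv_main (rows : List (List Int)) (i0 jj ii m : Int) :
    pvA_rows rows i0 (jj, ii, m)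
    = (if (rows.foldl (fun m row => row.foldl (fun m v => if v > m then v else m) m) m) > m
        then ((pvB_find (rows.foldl (fun m row => row.foldl (fun m v => if v > m then v else m) m) m) i0 rows).2,
              (pvB_find (rows.foldl (fun m row => row.foldl (fun m v => if v > m then v else m) m) m) i0 rows).1,
              rows.foldl (fun m row => row.foldl (fun m v => if v > m then v else m) m) m)
        else (jj, ii, m)) := by
  induction rows generalizing i0 jj ii m with
  | nil => simp [pvA_rows]
  | cons r rest ih =>
      simp only [pvA_rows, List.foldl]
      rw [pv_inner r r i0 jj ii m]
      have hM1ge : m ≤ r.foldl (fun m v => if v > m then v else m) m := pv_le_rowfold r m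
      by_cases h1 : r.foldl (fun m v => if v > m then v else m) m > m
      · rw [if_pos h1, ih]
        generalize hM1 : r.foldl (fun m v => if v > m then v else m) m = M1
        rw [hM1] at h1 hM1ge
        generalize hM : rest.foldl (fun m row => row.foldl (fun m v => if v > m then v else m) m) M1 = M
        have hMge : M1 ≤ M := hM ▸ pv_rowsfold_le rest M1
        have hmemle : ∀ a ∈ r, a ≤ M1 := fun a ha => hM1 ▸ pv_mem_le_rowfold r m a ha
        have hmemor : M1 = m ∨ M1 ∈ r := hM1 ▸ pv_rowfold_mem_or r m
        by_cases h2 : M > M1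
        · rw [if_pos h2, if_pos (by omega)]
          have hnot : M ∉ r := fun hmem => absurd (hmemle M hmem) (by omega)
          simp only [pvB_find, if_neg hnot]
        · have hEq : M = M1 := le_antisymm (by omega) hMge
          have hmem : M1 ∈ r := by
            rcases hmemor with h | h
            · omega
            · exact h
          rw [if_neg h2, if_pos (by omega), hEq]
          simp only [pvB_find, if_pos hmem]
      · have hEq1 : r.foldl (fun m v => if v > m then v else m) m = m := by omega
        rw [if_neg h1, ih, hEq1]
        have hmemle : ∀ a ∈ r, a ≤ m := fun a ha => hEq1 ▸ pv_mem_le_rowfold r m a ha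
        generalize hM : rest.foldl (fun m row => row.foldl (fun m v => if v > m then v else m) m) m = M
        by_cases h2 : M > m
        · rw [if_pos h2, if_pos h2]
          have hnot : M ∉ r := fun hmem => absurd (hmemle M hmem) (by omega)
          simp only [pvB_find, if_neg hnot]
        · rw [if_neg h2, if_neg h2]

-- ===== VERDICT (by name: the statement is the Claim_ definition above) =====
theorem mayores_mediciones_ICA_y_departamento_spec : Claim_equal_mayores_mediciones_ICA_y_departamento := by
  intro matrix ICAs_dict dept_dict _ _
  unfold Spec_mayores_mediciones_ICA_y_departamento
  simp only [mayores_mediciones_ICA_y_departamento, mayores_mediciones_ICA_y_departamento_alt, pvB_max]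
  rw [pv_main]
  by_cases h : matrix.foldl (fun m row => row.foldl (fun m v => if v > m then v else m) m) 0 > 0
  · rw [if_pos h, if_pos h]
  · rw [if_neg h, if_neg h]
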